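-- pv_equiv track=rewrite | github.com/Catrina-Lab/RNAProbes | src/rnaprobes/PinMol/pinmol.py | get_stem
-- ===== SOURCE A (Python) =====
-- basecomplement = str.maketrans({'A': 'U', 'C': 'G', 'G': 'C', 'U': 'A'})
--
-- def get_stem(probe_seq: str, probe_length: int):
--     seql = list(probe_seq)
--     seq_slc0 = seql[:probe_length+1]
--     seq_slc = list(itersplit_into_x_chunks(seq_slc0, 4, end=probe_length+1))
--
--     first_complement = seql[0].translate(basecomplement)
--     second_complement = seql[1].translate(basecomplement)
--     third_complement = seql[2].translate(basecomplement)
--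
--     stem13 = ['U', 'U', 'G', 'C']
--     stem14 = ['G', 'U', 'G', 'U']
--     stem15 = ['G', 'C', 'G', 'G']
--
--     slco1 = []
--     slco2 = []
--     slco3 = []
--     for slt in 'CU':
--         for slz in 'UC':
--             X = slt
--             Y = slz
--             stem1 = [X, 'U', Y, 'G']
--             stem2 = ['G', X, 'U', Y]
--             stem3 = ['G', 'A', 'G', X]
--             stem4 = [X, 'G', 'A', 'G']
--
--             stem5 = ['G', 'U', X, 'G']
--             stem6 = [X, 'G', 'U', Y]
--             stem7 = ['G', 'A', X, 'G']
--             stem8 = [X, 'G', 'A', Y]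
--
--             stem9 = [X, 'U', 'G', Y]
--             stem10 = ['G', X, 'U', 'G']
--             stem11 = [X, 'A', 'G', Y]
--             stem12 = ['G', X, 'A', 'G']
--
--             slco1.extend([stem1, stem2, stem3, stem4])
--             slco2.extend([stem5, stem6, stem7, stem8])
--             slco3.extend([stem9, stem10, stem11, stem12])
--
--     #~first 3 = last 3
--     if  first_complement == seql[-1] and second_complement == seql[-2]:
--         return 'GG' if third_complement == seql[-3] else 'CCG'
--
--     elif seql[0] == 'U' and seql[-1] == 'A':
--         return 'CCGG' if stem15 in seq_slc else 'GCCG'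
--
--     elif seql[0] == 'A' and seql[-1] == 'U':
--         return 'CGCC'
--
--     elif seql[-1] == first_complement and seql[0] in ['C', 'G']:
--         return 'CGAG'
--
--
--     elif seql[0] == 'U' and seql[-1] == 'G' and stem13 not in seq_slc:
--         return 'CGCGA'
--
--     elif seql[0] == 'G' and seql[-1] == 'U':
--         return 'CGCGA'
--
--     elif any(s in seq_slc for s in slco3) and stem14 not in seq_slc:
--         return 'GCACG'
--
--     elif any(s in seq_slc for s in slco1)and stem14 not in seq_slc:
--         return 'CGACG'
--
--     elif any(s in seq_slc for s in slco2) and stem14 not in seq_slc: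
--         return 'GCAGC'
--
--     else:
--         return 'CGAGC'
--
-- def itersplit_into_x_chunks(argum, chunksize, start=0, end=None): #split sequence in chunks of probe size
--     """
--     Split an sliceable object into chunks of a certain size
--     :param argum: the sliceable object
--     :param chunksize: the size of chunks to split the object into
--     :param start: the index to start on
--     :param end: the index to end on, exclusive
--     :return:
--     """
--     end = end or len(argum)
--     for pos in range(start, end-chunksize+1):
--         yield argum[pos:pos+chunksize]
-- ===== SOURCE B (Python) =====
-- def get_stem(probe_seq: str, probe_length: int):
--     comp = {'A': 'U', 'C': 'G', 'G': 'C', 'U': 'A'}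
--     first_c = comp.get(probe_seq[0], probe_seq[0])
--     second_c = comp.get(probe_seq[1], probe_seq[1])
--     third_c = comp.get(probe_seq[2], probe_seq[2])
--
--     def cu(ch):
--         return ch == 'C' or ch == 'U'
--
--     has13 = has14 = has15 = g1 = g2 = g3 = False
--     if probe_length >= 3:
--         prefix = probe_seq[:probe_length + 1]
--         for i in range(len(prefix) - 3):
--             a, b, c, d = prefix[i], prefix[i + 1], prefix[i + 2], prefix[i + 3]
--             if a == 'U' and b == 'U' and c == 'G' and d == 'C':
--                 has13 = True
--             if a == 'G' and b == 'U' and c == 'G' and d == 'U':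
--                 has14 = True
--             if a == 'G' and b == 'C' and c == 'G' and d == 'G':
--                 has15 = True
--             if ((cu(a) and b == 'U' and cu(c) and d == 'G') or
--                     (a == 'G' and cu(b) and c == 'U' and cu(d)) or
--                     (a == 'G' and b == 'A' and c == 'G' and cu(d)) or
--                     (cu(a) and b == 'G' and c == 'A' and d == 'G')):
--                 g1 = True
--             if ((a == 'G' and b == 'U' and cu(c) and d == 'G') or
--                     (cu(a) and b == 'G' and c == 'U' and cu(d)) or
--                     (a == 'G' and b == 'A' and cu(c) and d == 'G') or
--                     (cu(a) and b == 'G' and c == 'A' and cu(d))):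
--                 g2 = True
--             if ((cu(a) and b == 'U' and c == 'G' and cu(d)) or
--                     (a == 'G' and cu(b) and c == 'U' and d == 'G') or
--                     (cu(a) and b == 'A' and c == 'G' and cu(d)) or
--                     (a == 'G' and cu(b) and c == 'A' and d == 'G')):
--                 g3 = True
--
--     first, last, last2, last3 = probe_seq[0], probe_seq[-1], probe_seq[-2], probe_seq[-3]
--     if first_c == last and second_c == last2:
--         return 'GG' if third_c == last3 else 'CCG'
--     if first == 'U' and last == 'A':
--         return 'CCGG' if has15 else 'GCCG'
--     if first == 'A' and last == 'U':
--         return 'CGCC'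
--     if last == first_c and (first == 'C' or first == 'G'):
--         return 'CGAG'
--     if first == 'U' and last == 'G' and not has13:
--         return 'CGCGA'
--     if first == 'G' and last == 'U':
--         return 'CGCGA'
--     if g3 and not has14:
--         return 'GCACG'
--     if g1 and not has14:
--         return 'CGACG'
--     if g2 and not has14:
--         return 'GCAGC'
--     return 'CGAGC'
-- ===== Notes on version B (the rewrite author's own statement) =====
-- stated objective: faster
-- what changed: B replaces A's materialized chunk list, the 16 generated stem pattern lists and the repeated any()/in scans over them by a single pass over the 4-character windows that sets six boolean flags via positional predicates, then runs the same return cascade on the flags.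
-- outside the precondition, e.g. on get_stem('GU', 5): A raises IndexError, B raises IndexError
import Mathlib
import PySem

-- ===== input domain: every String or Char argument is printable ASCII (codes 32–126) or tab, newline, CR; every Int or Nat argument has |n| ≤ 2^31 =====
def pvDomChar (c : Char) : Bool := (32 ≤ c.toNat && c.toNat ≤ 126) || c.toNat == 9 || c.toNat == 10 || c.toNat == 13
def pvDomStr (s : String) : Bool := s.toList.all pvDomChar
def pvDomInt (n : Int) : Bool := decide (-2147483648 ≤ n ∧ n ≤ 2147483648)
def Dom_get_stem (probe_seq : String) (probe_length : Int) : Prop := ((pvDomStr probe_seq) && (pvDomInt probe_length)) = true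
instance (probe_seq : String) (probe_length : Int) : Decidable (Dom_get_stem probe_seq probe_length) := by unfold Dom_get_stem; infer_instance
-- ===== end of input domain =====

-- B re-implements the stem-tag cascade with a single pass over the 4-char windows setting six
-- boolean flags via positional predicates, instead of A's 48-pattern membership scans (objective: faster, constant factor).

-- ===== PORT A =====
-- seql[i].translate(basecomplement): per-char translation table
def pyTranslateBC (c : Char) : Char :=
  if c = 'A' then 'U' else if c = 'C' then 'G' else if c = 'G' then 'C' else if c = 'U' then 'A' else c

-- itersplit_into_x_chunks(argum, chunksize, start, end): 'end = end or len(argum)', then slices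
def itersplit_into_x_chunks (argum : List Char) (chunksize : Int) (start : Int) (end_ : Int) :
    List (List Char) :=
  (PySem.List.pyRange start ((if end_ = 0 then (argum.length : Int) else end_) - chunksize + 1) 1).map
    (fun pos => PySem.List.slice argum (some pos) (some (pos + chunksize)))

-- the two nested 'for slt in "CU": for slz in "UC":' loops extending slco1/slco2/slco3
def stemLoop : List (List Char) × List (List Char) × List (List Char) :=
  ("CU".toList).foldl (fun acc slt =>
    ("UC".toList).foldl (fun acc2 slz =>
      let X := slt
      let Y := slz
      (acc2.1 ++ [[X,'U',Y,'G'], ['G',X,'U',Y], ['G','A','G',X], [X,'G','A','G']],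
       acc2.2.1 ++ [['G','U',X,'G'], [X,'G','U',Y], ['G','A',X,'G'], [X,'G','A',Y]],
       acc2.2.2 ++ [[X,'U','G',Y], ['G',X,'U','G'], [X,'A','G',Y], ['G',X,'A','G']])) acc)
    ([], [], [])

def get_stem (probe_seq : String) (probe_length : Int) : String :=
  let seql := probe_seq.toList
  let seq_slc0 := PySem.List.slice seql none (some (probe_length + 1))
  let seq_slc := itersplit_into_x_chunks seq_slc0 4 0 (probe_length + 1)
  -- seql[0], seql[1], seql[2], seql[-1], seql[-2], seql[-3]; none = IndexError (outside Pre_)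
  match PySem.List.pyGet? seql 0, PySem.List.pyGet? seql 1, PySem.List.pyGet? seql 2,
        PySem.List.pyGet? seql (-1), PySem.List.pyGet? seql (-2), PySem.List.pyGet? seql (-3) with
  | some s0, some s1, some s2, some sm1, some sm2, some sm3 =>
    let first_complement := pyTranslateBC s0
    let second_complement := pyTranslateBC s1
    let third_complement := pyTranslateBC s2
    let stem13 : List Char := ['U','U','G','C']
    let stem14 : List Char := ['G','U','G','U']
    let stem15 : List Char := ['G','C','G','G']
    let slco1 := stemLoop.1
    let slco2 := stemLoop.2.1
    let slco3 := stemLoop.2.2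
    if first_complement = sm1 ∧ second_complement = sm2 then
      (if third_complement = sm3 then "GG" else "CCG")
    else if s0 = 'U' ∧ sm1 = 'A' then
      (if seq_slc.contains stem15 then "CCGG" else "GCCG")
    else if s0 = 'A' ∧ sm1 = 'U' then "CGCC"
    else if sm1 = first_complement ∧ (s0 = 'C' ∨ s0 = 'G') then "CGAG"
    else if s0 = 'U' ∧ sm1 = 'G' ∧ ¬ (seq_slc.contains stem13) then "CGCGA"
    else if s0 = 'G' ∧ sm1 = 'U' then "CGCGA"
    else if (slco3.any (fun s => seq_slc.contains s)) ∧ ¬ (seq_slc.contains stem14) then "GCACG"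
    else if (slco1.any (fun s => seq_slc.contains s)) ∧ ¬ (seq_slc.contains stem14) then "CGACG"
    else if (slco2.any (fun s => seq_slc.contains s)) ∧ ¬ (seq_slc.contains stem14) then "GCAGC"
    else "CGAGC"
  | _, _, _, _, _, _ => ""

-- ===== PORT B =====
-- comp.get(c, c) on the 4-entry dict
def bComp : PySem.Dict Char Char := PySem.Dict.ofList [('A','U'), ('C','G'), ('G','C'), ('U','A')]
def bGet (c : Char) : Char := PySem.Dict.getD bComp c c

def cuB (ch : Char) : Bool := ch == 'C' || ch == 'U'

-- the single loop over 4-char windows of the prefix, updating the six flags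
def scanFlags : List Char → Bool → Bool → Bool → Bool → Bool → Bool →
    Bool × Bool × Bool × Bool × Bool × Bool
  | a :: b :: c :: d :: rest, h13, h14, h15, g1, g2, g3 =>
      scanFlags (b :: c :: d :: rest)
        (h13 || (a == 'U' && b == 'U' && c == 'G' && d == 'C'))
        (h14 || (a == 'G' && b == 'U' && c == 'G' && d == 'U'))
        (h15 || (a == 'G' && b == 'C' && c == 'G' && d == 'G'))
        (g1 || ((cuB a && b == 'U' && cuB c && d == 'G') ||
                (a == 'G' && cuB b && c == 'U' && cuB d) ||
                (a == 'G' && b == 'A' && c == 'G' && cuB d) ||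
                (cuB a && b == 'G' && c == 'A' && d == 'G')))
        (g2 || ((a == 'G' && b == 'U' && cuB c && d == 'G') ||
                (cuB a && b == 'G' && c == 'U' && cuB d) ||
                (a == 'G' && b == 'A' && cuB c && d == 'G') ||
                (cuB a && b == 'G' && c == 'A' && cuB d)))
        (g3 || ((cuB a && b == 'U' && c == 'G' && cuB d) ||
                (a == 'G' && cuB b && c == 'U' && d == 'G') ||
                (cuB a && b == 'A' && c == 'G' && cuB d) ||
                (a == 'G' && cuB b && c == 'A' && d == 'G')))
  | _, h13, h14, h15, g1, g2, g3 => (h13, h14, h15, g1, g2, g3)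

def get_stem_alt (probe_seq : String) (probe_length : Int) : String :=
  let seql := probe_seq.toList
  -- probe_seq[0], [1], [2], [-1], [-2], [-3]; none = IndexError (outside Pre_)
  match PySem.List.pyGet? seql 0 with
  | none => ""
  | some first =>
  match PySem.List.pyGet? seql 1 with
  | none => ""
  | some c1 =>
  match PySem.List.pyGet? seql 2 with
  | none => ""
  | some c2 =>
  match PySem.List.pyGet? seql (-1) with
  | none => ""
  | some last =>
  match PySem.List.pyGet? seql (-2) with
  | none => ""
  | some last2 =>
  match PySem.List.pyGet? seql (-3) with
  | none => ""
  | some last3 =>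
    let first_c := bGet first
    let second_c := bGet c1
    let third_c := bGet c2
    let flags :=
      if 3 ≤ probe_length then
        scanFlags (PySem.List.slice seql none (some (probe_length + 1)))
          false false false false false false
      else (false, false, false, false, false, false)
    if first_c = last ∧ second_c = last2 then
      (if third_c = last3 then "GG" else "CCG")
    else if first = 'U' ∧ last = 'A' then
      (if flags.2.2.1 then "CCGG" else "GCCG")
    else if first = 'A' ∧ last = 'U' then "CGCC"
    else if last = first_c ∧ (first = 'C' ∨ first = 'G') then "CGAG"
    else if first = 'U' ∧ last = 'G' ∧ ¬ flags.1 then "CGCGA"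
    else if first = 'G' ∧ last = 'U' then "CGCGA"
    else if flags.2.2.2.2.2 ∧ ¬ flags.2.1 then "GCACG"
    else if flags.2.2.2.1 ∧ ¬ flags.2.1 then "CGACG"
    else if flags.2.2.2.2.1 ∧ ¬ flags.2.1 then "GCAGC"
    else "CGAGC"

-- ===== PRECONDITION & SPEC =====
-- Pre_ excludes strings shorter than 3 characters, on which A raises IndexError (seql[1]/seql[2]/seql[-2]).
def Pre_get_stem (probe_seq : String) (probe_length : Int) : Prop :=
  3 ≤ probe_seq.toList.length
instance (probe_seq : String) (probe_length : Int) : Decidable (Pre_get_stem probe_seq probe_length) := by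
  unfold Pre_get_stem; infer_instance

def pvWitness_get_stem : String × Int := ("GUACG", 4)

def Spec_get_stem (probe_seq : String) (probe_length : Int) (out : String) : Prop :=
  out = get_stem_alt probe_seq probe_length
instance (probe_seq : String) (probe_length : Int) (out : String) : Decidable (Spec_get_stem probe_seq probe_length out) := by
  unfold Spec_get_stem; infer_instance

-- ===== CLAIM (what is proved, stated in full; the proofs are below) =====
def Claim_equal_get_stem : Prop := ∀ (probe_seq : String) (probe_length : Int),
  Dom_get_stem probe_seq probe_length → Pre_get_stem probe_seq probe_length →
  Spec_get_stem probe_seq probe_length (get_stem probe_seq probe_length)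

-- ===== LEMMAS AND PROOFS =====


-- sliding-window "any" combinator (proof-side)
def anyWin (p : Char → Char → Char → Char → Bool) : List Char → Bool
  | a :: b :: c :: d :: rest => p a b c d || anyWin p (b :: c :: d :: rest)
  | _ => false

theorem anyWin_short (p : Char → Char → Char → Char → Bool) (l : List Char)
    (h : l.length < 4) : anyWin p l = false := by
  rcases l with _ | ⟨a, _ | ⟨b, _ | ⟨c, _ | ⟨d, t⟩⟩⟩⟩
  · rfl
  · rfl
  · rfl
  · rfl
  · simp only [List.length_cons] at h
    omega

theorem anyWin_or (p q : Char → Char → Char → Char → Bool) (l : List Char) :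
    (anyWin p l || anyWin q l) =
      anyWin (fun a b c d => p a b c d || q a b c d) l := by
  induction l with
  | nil => simp [anyWin]
  | cons a t ih =>
    rcases t with _ | ⟨b, _ | ⟨c, _ | ⟨d, r⟩⟩⟩
    · simp [anyWin]
    · simp [anyWin]
    · simp [anyWin]
    · simp only [anyWin]
      rw [← ih]
      cases p a b c d <;> cases q a b c d <;>
        simp [Bool.or_comm]

theorem anyWin_congr (p q : Char → Char → Char → Char → Bool)
    (h : ∀ a b c d, p a b c d = q a b c d) (l : List Char) :
    anyWin p l = anyWin q l := by
  induction l with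
  | nil => simp [anyWin]
  | cons a t ih =>
    rcases t with _ | ⟨b, _ | ⟨c, _ | ⟨d, r⟩⟩⟩ <;> simp_all [anyWin]

-- the six window predicates of B's single pass
def P13 : Char → Char → Char → Char → Bool := fun a b c d => a == 'U' && b == 'U' && c == 'G' && d == 'C'
def P14 : Char → Char → Char → Char → Bool := fun a b c d => a == 'G' && b == 'U' && c == 'G' && d == 'U'
def P15 : Char → Char → Char → Char → Bool := fun a b c d => a == 'G' && b == 'C' && c == 'G' && d == 'G'
def PG1 : Char → Char → Char → Char → Bool := fun a b c d =>
  (cuB a && b == 'U' && cuB c && d == 'G') || (a == 'G' && cuB b && c == 'U' && cuB d) ||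
  (a == 'G' && b == 'A' && c == 'G' && cuB d) || (cuB a && b == 'G' && c == 'A' && d == 'G')
def PG2 : Char → Char → Char → Char → Bool := fun a b c d =>
  (a == 'G' && b == 'U' && cuB c && d == 'G') || (cuB a && b == 'G' && c == 'U' && cuB d) ||
  (a == 'G' && b == 'A' && cuB c && d == 'G') || (cuB a && b == 'G' && c == 'A' && cuB d)
def PG3 : Char → Char → Char → Char → Bool := fun a b c d =>
  (cuB a && b == 'U' && c == 'G' && cuB d) || (a == 'G' && cuB b && c == 'U' && d == 'G') ||
  (cuB a && b == 'A' && c == 'G' && cuB d) || (a == 'G' && cuB b && c == 'A' && d == 'G')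

theorem scanFlags_eq (l : List Char) : ∀ (b13 b14 b15 b1 b2 b3 : Bool),
    scanFlags l b13 b14 b15 b1 b2 b3 =
      (b13 || anyWin P13 l, b14 || anyWin P14 l, b15 || anyWin P15 l,
       b1 || anyWin PG1 l, b2 || anyWin PG2 l, b3 || anyWin PG3 l) := by
  induction l with
  | nil => intro b13 b14 b15 b1 b2 b3; simp [scanFlags, anyWin]
  | cons a t ih =>
    intro b13 b14 b15 b1 b2 b3
    rcases t with _ | ⟨b, _ | ⟨c, _ | ⟨d, r⟩⟩⟩
    · simp [scanFlags, anyWin]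
    · simp [scanFlags, anyWin]
    · simp [scanFlags, anyWin]
    · rw [scanFlags, ih]
      simp [anyWin, P13, P14, P15, PG1, PG2, PG3, Bool.or_assoc]

theorem seq_slc_empty (l : List Char) (p : Int) (hp : p < 3) :
    itersplit_into_x_chunks (PySem.List.slice l none (some (p + 1))) 4 0 (p + 1) = [] := by
  unfold itersplit_into_x_chunks
  by_cases h0 : p + 1 = 0
  · have hsl : PySem.List.slice l none (some (p + 1)) = [] := by
      rw [h0, PySem.List.slice_to l (by norm_num)]
      simp
    rw [if_pos h0, hsl]
    rw [PySem.List.pyRange_one_eq_nil (by norm_num : ((([] : List Char).length : Int) - 4 + 1 ≤ 0))]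
    simp
  · rw [if_neg h0, PySem.List.pyRange_one_eq_nil (by omega : p + 1 - 4 + 1 ≤ 0)]
    simp

theorem seq_slc_main (l : List Char) (p : Int) (hp : 3 ≤ p) :
    itersplit_into_x_chunks (PySem.List.slice l none (some (p + 1))) 4 0 (p + 1) =
      (List.range (p - 2).toNat).map
        (fun k => ((PySem.List.slice l none (some (p + 1))).drop k).take 4) := by
  unfold itersplit_into_x_chunks
  rw [if_neg (by omega : ¬ (p + 1 = 0))]
  rw [show p + 1 - 4 + 1 = p - 2 by ring]
  rw [PySem.List.pyRange_one 0 (p - 2), List.map_map]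
  rw [show p - 2 - 0 = p - 2 by ring]
  apply List.map_congr_left
  intro k hk
  show PySem.List.slice _ (some (0 + (k : Int))) (some (0 + (k : Int) + 4)) = _
  rw [show (0 : Int) + (k : Int) + 4 = ((k : Int) + ((4 : Nat) : Int)) by norm_num,
    show (0 : Int) + (k : Int) = ((k : Nat) : Int) by norm_num]
  exact PySem.List.slice_natCast_add _ k 4

theorem contains_windows (pat : List Char) (hpat : pat.length = 4) :
    ∀ (pref : List Char) (m : Nat), pref.length ≤ m + 3 →
    ((List.range m).map (fun k => (pref.drop k).take 4)).contains pat =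
      anyWin (fun a b c d => pat == [a, b, c, d]) pref := by
  intro pref
  induction pref with
  | nil =>
    intro m hm
    rw [anyWin_short _ _ (by simp)]
    rw [List.contains_eq_mem]
    simp only [decide_eq_false_iff_not, List.mem_map]
    rintro ⟨k, hk, rfl⟩
    simp at hpat
  | cons a t ih =>
    intro m hm
    by_cases hshort : (a :: t).length < 4
    · rw [anyWin_short _ _ hshort]
      rw [List.contains_eq_mem]
      simp only [decide_eq_false_iff_not, List.mem_map]
      rintro ⟨k, hk, hw⟩
      have hlen := congrArg List.length hw
      simp only [List.length_take, List.length_drop, hpat] at hlen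
      simp only [List.length_cons] at hshort hlen
      omega
    · rcases t with _ | ⟨b, _ | ⟨c, _ | ⟨d, r⟩⟩⟩ <;> simp at hshort
      obtain ⟨m', rfl⟩ : ∃ m', m = m' + 1 := ⟨m - 1, by simp at hm; omega⟩
      rw [List.range_succ_eq_map, List.map_cons, List.map_map, List.contains_cons, anyWin]
      have htail :
          (List.range m').map ((fun k => ((a :: b :: c :: d :: r).drop k).take 4) ∘ Nat.succ) =
            (List.range m').map (fun k => ((b :: c :: d :: r).drop k).take 4) := by
        apply List.map_congr_left
        intro k hk
        rfl
      rw [htail, ih m' (by simp at hm ⊢; omega)]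
      rfl

-- classification of the four bases (all other characters behave alike in every test)
def clB (c : Char) : Fin 5 :=
  if c = 'A' then 0 else if c = 'C' then 1 else if c = 'G' then 2 else if c = 'U' then 3 else 4

theorem beq_A (c : Char) : (c == 'A') = (clB c == 0) := by
  unfold clB; split_ifs with h1 h2 h3 h4 <;> simp_all
theorem beq_C (c : Char) : (c == 'C') = (clB c == 1) := by
  unfold clB; split_ifs with h1 h2 h3 h4 <;> simp_all
theorem beq_G (c : Char) : (c == 'G') = (clB c == 2) := by
  unfold clB; split_ifs with h1 h2 h3 h4 <;> simp_all
theorem beq_U (c : Char) : (c == 'U') = (clB c == 3) := by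
  unfold clB; split_ifs with h1 h2 h3 h4 <;> simp_all
theorem beq_A' (c : Char) : ('A' == c) = (clB c == 0) := by rw [← beq_A]; exact Bool.beq_comm
theorem beq_C' (c : Char) : ('C' == c) = (clB c == 1) := by rw [← beq_C]; exact Bool.beq_comm
theorem beq_G' (c : Char) : ('G' == c) = (clB c == 2) := by rw [← beq_G]; exact Bool.beq_comm
theorem beq_U' (c : Char) : ('U' == c) = (clB c == 3) := by rw [← beq_U]; exact Bool.beq_comm
theorem cuB_eq (c : Char) : cuB c = (clB c == 1 || clB c == 3) := by
  unfold cuB; rw [beq_C, beq_U]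

theorem contains_windows4 (w x y z : Char) (pref : List Char) (m : Nat)
    (h : pref.length ≤ m + 3) :
    ((List.range m).map (fun k => (pref.drop k).take 4)).contains [w, x, y, z] =
      anyWin (fun a b c d => w == a && (x == b && (y == c && z == d))) pref := by
  rw [contains_windows [w, x, y, z] rfl pref m h]
  exact anyWin_congr _ _ (fun a b c d => by simp) pref

theorem bridge13 (pref : List Char) (m : Nat) (h : pref.length ≤ m + 3) :
    ((List.range m).map (fun k => (pref.drop k).take 4)).contains ['U', 'U', 'G', 'C'] =
      anyWin P13 pref := by
  rw [contains_windows4 _ _ _ _ pref m h]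
  refine anyWin_congr _ _ (fun a b c d => ?_) pref
  simp only [P13, beq_A, beq_C, beq_G, beq_U, beq_A', beq_C', beq_G', beq_U', cuB_eq]
  generalize clB a = w; generalize clB b = x; generalize clB c = y; generalize clB d = z
  revert w x y z; decide

theorem bridge14 (pref : List Char) (m : Nat) (h : pref.length ≤ m + 3) :
    ((List.range m).map (fun k => (pref.drop k).take 4)).contains ['G', 'U', 'G', 'U'] =
      anyWin P14 pref := by
  rw [contains_windows4 _ _ _ _ pref m h]
  refine anyWin_congr _ _ (fun a b c d => ?_) pref
  simp only [P14, beq_A, beq_C, beq_G, beq_U, beq_A', beq_C', beq_G', beq_U', cuB_eq]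
  generalize clB a = w; generalize clB b = x; generalize clB c = y; generalize clB d = z
  revert w x y z; decide

theorem bridge15 (pref : List Char) (m : Nat) (h : pref.length ≤ m + 3) :
    ((List.range m).map (fun k => (pref.drop k).take 4)).contains ['G', 'C', 'G', 'G'] =
      anyWin P15 pref := by
  rw [contains_windows4 _ _ _ _ pref m h]
  refine anyWin_congr _ _ (fun a b c d => ?_) pref
  simp only [P15, beq_A, beq_C, beq_G, beq_U, beq_A', beq_C', beq_G', beq_U', cuB_eq]
  generalize clB a = w; generalize clB b = x; generalize clB c = y; generalize clB d = z
  revert w x y z; decide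

theorem bridgeG1 (pref : List Char) (m : Nat) (h : pref.length ≤ m + 3) :
    (stemLoop.1.any fun s =>
        ((List.range m).map (fun k => (pref.drop k).take 4)).contains s) =
      anyWin PG1 pref := by
  have hsl : stemLoop.1 =
      [['C','U','U','G'], ['G','C','U','U'], ['G','A','G','C'], ['C','G','A','G'],
       ['C','U','C','G'], ['G','C','U','C'], ['G','A','G','C'], ['C','G','A','G'],
       ['U','U','U','G'], ['G','U','U','U'], ['G','A','G','U'], ['U','G','A','G'],
       ['U','U','C','G'], ['G','U','U','C'], ['G','A','G','U'], ['U','G','A','G']] := by rfl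
  rw [hsl]
  simp only [List.any_cons, List.any_nil, Bool.or_false]
  rw [contains_windows4 'C' 'U' 'U' 'G' pref m h, contains_windows4 'G' 'C' 'U' 'U' pref m h,
    contains_windows4 'G' 'A' 'G' 'C' pref m h, contains_windows4 'C' 'G' 'A' 'G' pref m h,
    contains_windows4 'C' 'U' 'C' 'G' pref m h, contains_windows4 'G' 'C' 'U' 'C' pref m h,
    contains_windows4 'U' 'U' 'U' 'G' pref m h, contains_windows4 'G' 'U' 'U' 'U' pref m h,
    contains_windows4 'G' 'A' 'G' 'U' pref m h, contains_windows4 'U' 'G' 'A' 'G' pref m h,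
    contains_windows4 'U' 'U' 'C' 'G' pref m h, contains_windows4 'G' 'U' 'U' 'C' pref m h]
  simp only [anyWin_or]
  refine anyWin_congr _ _ (fun a b c d => ?_) pref
  simp only [PG1, beq_A, beq_C, beq_G, beq_U, beq_A', beq_C', beq_G', beq_U', cuB_eq]
  generalize clB a = w; generalize clB b = x; generalize clB c = y; generalize clB d = z
  revert w x y z; decide

theorem bridgeG2 (pref : List Char) (m : Nat) (h : pref.length ≤ m + 3) :
    (stemLoop.2.1.any fun s =>
        ((List.range m).map (fun k => (pref.drop k).take 4)).contains s) =
      anyWin PG2 pref := by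
  have hsl : stemLoop.2.1 =
      [['G','U','C','G'], ['C','G','U','U'], ['G','A','C','G'], ['C','G','A','U'],
       ['G','U','C','G'], ['C','G','U','C'], ['G','A','C','G'], ['C','G','A','C'],
       ['G','U','U','G'], ['U','G','U','U'], ['G','A','U','G'], ['U','G','A','U'],
       ['G','U','U','G'], ['U','G','U','C'], ['G','A','U','G'], ['U','G','A','C']] := by rfl
  rw [hsl]
  simp only [List.any_cons, List.any_nil, Bool.or_false]
  rw [contains_windows4 'G' 'U' 'C' 'G' pref m h, contains_windows4 'C' 'G' 'U' 'U' pref m h,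
    contains_windows4 'G' 'A' 'C' 'G' pref m h, contains_windows4 'C' 'G' 'A' 'U' pref m h,
    contains_windows4 'C' 'G' 'U' 'C' pref m h, contains_windows4 'C' 'G' 'A' 'C' pref m h,
    contains_windows4 'G' 'U' 'U' 'G' pref m h, contains_windows4 'U' 'G' 'U' 'U' pref m h,
    contains_windows4 'G' 'A' 'U' 'G' pref m h, contains_windows4 'U' 'G' 'A' 'U' pref m h,
    contains_windows4 'U' 'G' 'U' 'C' pref m h, contains_windows4 'U' 'G' 'A' 'C' pref m h]
  simp only [anyWin_or]
  refine anyWin_congr _ _ (fun a b c d => ?_) pref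
  simp only [PG2, beq_A, beq_C, beq_G, beq_U, beq_A', beq_C', beq_G', beq_U', cuB_eq]
  generalize clB a = w; generalize clB b = x; generalize clB c = y; generalize clB d = z
  revert w x y z; decide

theorem bridgeG3 (pref : List Char) (m : Nat) (h : pref.length ≤ m + 3) :
    (stemLoop.2.2.any fun s =>
        ((List.range m).map (fun k => (pref.drop k).take 4)).contains s) =
      anyWin PG3 pref := by
  have hsl : stemLoop.2.2 =
      [['C','U','G','U'], ['G','C','U','G'], ['C','A','G','U'], ['G','C','A','G'],
       ['C','U','G','C'], ['G','C','U','G'], ['C','A','G','C'], ['G','C','A','G'],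
       ['U','U','G','U'], ['G','U','U','G'], ['U','A','G','U'], ['G','U','A','G'],
       ['U','U','G','C'], ['G','U','U','G'], ['U','A','G','C'], ['G','U','A','G']] := by rfl
  rw [hsl]
  simp only [List.any_cons, List.any_nil, Bool.or_false]
  rw [contains_windows4 'C' 'U' 'G' 'U' pref m h, contains_windows4 'G' 'C' 'U' 'G' pref m h,
    contains_windows4 'C' 'A' 'G' 'U' pref m h, contains_windows4 'G' 'C' 'A' 'G' pref m h,
    contains_windows4 'C' 'U' 'G' 'C' pref m h, contains_windows4 'C' 'A' 'G' 'C' pref m h,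
    contains_windows4 'U' 'U' 'G' 'U' pref m h, contains_windows4 'G' 'U' 'U' 'G' pref m h,
    contains_windows4 'U' 'A' 'G' 'U' pref m h, contains_windows4 'G' 'U' 'A' 'G' pref m h,
    contains_windows4 'U' 'U' 'G' 'C' pref m h, contains_windows4 'U' 'A' 'G' 'C' pref m h]
  simp only [anyWin_or]
  refine anyWin_congr _ _ (fun a b c d => ?_) pref
  simp only [PG3, beq_A, beq_C, beq_G, beq_U, beq_A', beq_C', beq_G', beq_U', cuB_eq]
  generalize clB a = w; generalize clB b = x; generalize clB c = y; generalize clB d = z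
  revert w x y z; decide

theorem bGet_eq (c : Char) : bGet c = pyTranslateBC c := by
  unfold bGet pyTranslateBC
  by_cases h1 : c = 'A'
  · subst h1; rfl
  rw [if_neg h1]
  by_cases h2 : c = 'C'
  · subst h2; rfl
  rw [if_neg h2]
  by_cases h3 : c = 'G'
  · subst h3; rfl
  rw [if_neg h3]
  by_cases h4 : c = 'U'
  · subst h4; rfl
  rw [if_neg h4]
  have hi : bComp.items = [('A','U'), ('C','G'), ('G','C'), ('U','A')] := by rfl
  have e1 : ('A' == c) = false := by simp [Ne.symm h1]
  have e2 : ('C' == c) = false := by simp [Ne.symm h2]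
  have e3 : ('G' == c) = false := by simp [Ne.symm h3]
  have e4 : ('U' == c) = false := by simp [Ne.symm h4]
  simp [PySem.Dict.getD, PySem.Dict.get?, hi, List.find?, e1, e2, e3, e4]

theorem pyGet?_isSome_of (l : List Char) (i : Int)
    (h : -(l.length : Int) ≤ i ∧ i < (l.length : Int)) :
    ∃ x, PySem.List.pyGet? l i = some x := by
  cases hh : PySem.List.pyGet? l i with
  | none =>
    rw [PySem.List.pyGet?_eq_none_iff] at hh
    exact absurd h hh
  | some x => exact ⟨x, rfl⟩

-- ===== VERDICT (by name: the statement is the Claim_ definition above) =====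
theorem get_stem_spec : Claim_equal_get_stem := by
  intro s p hDom hPre
  unfold Spec_get_stem
  unfold Pre_get_stem at hPre
  obtain ⟨x0, h0⟩ := pyGet?_isSome_of s.toList 0 (by omega)
  obtain ⟨x1, h1⟩ := pyGet?_isSome_of s.toList 1 (by omega)
  obtain ⟨x2, h2⟩ := pyGet?_isSome_of s.toList 2 (by omega)
  obtain ⟨y1, g1⟩ := pyGet?_isSome_of s.toList (-1) (by omega)
  obtain ⟨y2, g2⟩ := pyGet?_isSome_of s.toList (-2) (by omega)
  obtain ⟨y3, g3⟩ := pyGet?_isSome_of s.toList (-3) (by omega)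
  simp only [get_stem, get_stem_alt]
  rw [h0, h1, h2, g1, g2, g3]
  by_cases hp3 : 3 ≤ p
  · rw [if_pos hp3, scanFlags_eq]
    rw [seq_slc_main s.toList p hp3]
    have hlp : (PySem.List.slice s.toList none (some (p + 1))).length ≤ (p - 2).toNat + 3 := by
      rw [PySem.List.slice_to _ (by omega : (0 : Int) ≤ p + 1)]
      calc (s.toList.take (p + 1).toNat).length
          ≤ (p + 1).toNat := List.length_take_le _ _
        _ ≤ (p - 2).toNat + 3 := by omega
    rw [bridge13 _ _ hlp, bridge14 _ _ hlp, bridge15 _ _ hlp,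
        bridgeG1 _ _ hlp, bridgeG2 _ _ hlp, bridgeG3 _ _ hlp]
    simp only [Bool.false_or, bGet_eq]
  · rw [if_neg hp3, seq_slc_empty s.toList p (by omega)]
    simp only [List.contains_nil, List.any_nil, bGet_eq]
    rfl
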